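-- pv_equiv track=rewrite | github.com/MrBrantCode/unitest_baseline | mut_generate/mist_train_cf/cf_40670/solution.py | calculate_unique_answers
-- ===== SOURCE A (Python) =====
-- from typing import List
--
-- def calculate_unique_answers(lines: List[str]) -> int:
--     total_unique_answers = 0
--     group_answers = set()
--
--     for line in lines:
--         if line == "\n":
--             total_unique_answers += len(group_answers)
--             group_answers = set()
--         else:
--             for answer in line.strip("\n"):
--                 group_answers.add(answer)
--
--     total_unique_answers += len(group_answers)  # Add the unique answers from the last group
--     return total_unique_answers
-- ===== SOURCE B (Python) =====
-- def calculate_unique_answers(lines):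
--     # Two-phase: partition lines into groups (separator = exactly "\n"), then sum unique chars per group.
--     groups = []
--     current = []
--     for line in lines:
--         if line == "\n":
--             groups.append(current)
--             current = []
--         else:
--             current.append(line.strip("\n"))
--     groups.append(current)
--     return sum(len({c for s in g for c in s}) for g in groups)
-- ===== Notes on version B (the rewrite author's own statement) =====
-- stated objective: alternative
-- what changed: B separates grouping from counting: it first partitions the lines into groups at '\n' separators, then sums the number of distinct characters per group, instead of A's single stateful loop with a running set flushed at each separator.
import Mathlib
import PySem

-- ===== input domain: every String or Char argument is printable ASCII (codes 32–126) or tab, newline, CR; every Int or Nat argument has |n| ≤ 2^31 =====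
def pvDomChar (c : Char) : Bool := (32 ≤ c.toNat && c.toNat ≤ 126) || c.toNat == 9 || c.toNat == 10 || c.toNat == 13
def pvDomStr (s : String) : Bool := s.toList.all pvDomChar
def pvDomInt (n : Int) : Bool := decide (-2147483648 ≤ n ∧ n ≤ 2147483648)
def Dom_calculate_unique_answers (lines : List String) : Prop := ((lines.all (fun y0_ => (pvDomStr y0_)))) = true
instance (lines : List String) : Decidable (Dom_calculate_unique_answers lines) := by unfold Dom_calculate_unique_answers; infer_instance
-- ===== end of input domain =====

-- B separates grouping from counting: it first partitions the lines into groups at "\n"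
-- separators, then sums the number of distinct characters per group, instead of A's single
-- stateful loop with a running set flushed at each separator. Objective: alternative decomposition.

-- ===== PORT A =====
def calculate_unique_answers (lines : List String) : Int :=
  let st := lines.foldl
    (fun (st : Int × PySem.Set Char) line =>
      if line = "\n" then
        (st.1 + PySem.Set.len st.2, PySem.Set.empty)
      else
        (st.1, (PySem.Str.stripChars line "\n").toList.foldl PySem.Set.add st.2))
    (0, PySem.Set.empty)
  st.1 + PySem.Set.len st.2

-- ===== PORT B =====
def calculate_unique_answers_alt (lines : List String) : Int :=
  let st := lines.foldl
    (fun (st : List (List String) × List String) line =>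
      if line = "\n" then
        (st.1 ++ [st.2], [])
      else
        (st.1, st.2 ++ [PySem.Str.stripChars line "\n"]))
    ([], [])
  let groups := st.1 ++ [st.2]
  (groups.map (fun g => PySem.Set.len (PySem.Set.ofList (g.flatMap String.toList)))).sum

-- ===== PRECONDITION & SPEC =====
def Spec_calculate_unique_answers (lines : List String) (out : Int) : Prop := out = calculate_unique_answers_alt lines
instance (lines : List String) (out : Int) : Decidable (Spec_calculate_unique_answers lines out) := by unfold Spec_calculate_unique_answers; infer_instance

-- ===== CLAIM (what is proved, stated in full; the proofs are below) =====
def Claim_equal_calculate_unique_answers : Prop := ∀ (lines : List String), Dom_calculate_unique_answers lines → Spec_calculate_unique_answers lines (calculate_unique_answers lines)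

-- ===== LEMMAS AND PROOFS =====

-- per-group count used by B
def pvCnt (g : List String) : Int := PySem.Set.len (PySem.Set.ofList (g.flatMap String.toList))

-- folding Set.add over xs starting from ofList m builds ofList (m ++ xs)
theorem foldl_add_ofList (m xs : List Char) :
    xs.foldl PySem.Set.add (PySem.Set.ofList m) = PySem.Set.ofList (m ++ xs) := by
  rw [PySem.Set.ofList_eq_foldl, PySem.Set.ofList_eq_foldl, List.foldl_append]

-- main invariant: A's fold from (sum of counts of gs, set of cur's chars) ends at B's total
theorem key_inv (lines : List String) (gs : List (List String)) (cur : List String) :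
    (let stA := lines.foldl
        (fun (st : Int × PySem.Set Char) line =>
          if line = "\n" then (st.1 + PySem.Set.len st.2, PySem.Set.empty)
          else (st.1, (PySem.Str.stripChars line "\n").toList.foldl PySem.Set.add st.2))
        ((gs.map pvCnt).sum, PySem.Set.ofList (cur.flatMap String.toList));
      stA.1 + PySem.Set.len stA.2)
    = (let stB := lines.foldl
        (fun (st : List (List String) × List String) line =>
          if line = "\n" then (st.1 ++ [st.2], []) else (st.1, st.2 ++ [PySem.Str.stripChars line "\n"]))
        (gs, cur);
      ((stB.1 ++ [stB.2]).map pvCnt).sum) := by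
  induction lines generalizing gs cur with
  | nil =>
    simp [pvCnt]
  | cons l rest ih =>
    by_cases h : l = "\n"
    · simp only [List.foldl_cons, if_pos h]
      have h1 : (gs.map pvCnt).sum + PySem.Set.len (PySem.Set.ofList (cur.flatMap String.toList))
          = ((gs ++ [cur]).map pvCnt).sum := by
        simp [pvCnt]
      have := ih (gs ++ [cur]) []
      simpa [h1, PySem.Set.empty] using this
    · simp only [List.foldl_cons, if_neg h]
      have := ih gs (cur ++ [PySem.Str.stripChars l "\n"])
      simpa [foldl_add_ofList] using this

-- ===== VERDICT (by name: the statement is the Claim_ definition above) =====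
theorem calculate_unique_answers_spec : Claim_equal_calculate_unique_answers := by
  intro lines _
  unfold Spec_calculate_unique_answers calculate_unique_answers calculate_unique_answers_alt
  have := key_inv lines [] []
  simpa [pvCnt, PySem.Set.empty] using this
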